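-- pv_equiv track=rewrite | github.com/GuidoMateoBZ/proyectos-evaluativos-ia | 1er_Proyecto_Evaluativo_IA/fitness.py | contar_estela
-- ===== SOURCE A (Python) =====
-- def contar_estela(molino, molinos):
--     estela = 0
--     for otro in molinos:
--         ##chequeo qe no sea el mismo molino
--         if otro == molino:
--             estela += 1
--     ##este a oeste
--         if (molino[0] == otro[0] and 0 < (molino[1] - otro[1]) <=3):
--             estela +=1
--         elif (molino[1] == otro[1] and 0 < (otro[0] - molino[0]) <= 3):
--             estela +=1
--     return estela
-- ===== SOURCE B (Python) =====
-- def contar_estela(molino, molinos):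
--     cnt = {}
--     for m in molinos:
--         cnt[m] = cnt.get(m, 0) + 1
--     x, y = molino
--     candidatos = [molino] + [(x, y - d) for d in (1, 2, 3)] + [(x + d, y) for d in (1, 2, 3)]
--     return sum(cnt.get(c, 0) for c in candidatos)
-- ===== Notes on version B (the rewrite author's own statement) =====
-- stated objective: idiomatic
-- what changed: Replaced the per-windmill conditional scan with a frequency table built in one pass, summing the counts of the seven fixed candidate coordinates (the windmill itself, the three cells south, the three cells east).
import Mathlib
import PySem

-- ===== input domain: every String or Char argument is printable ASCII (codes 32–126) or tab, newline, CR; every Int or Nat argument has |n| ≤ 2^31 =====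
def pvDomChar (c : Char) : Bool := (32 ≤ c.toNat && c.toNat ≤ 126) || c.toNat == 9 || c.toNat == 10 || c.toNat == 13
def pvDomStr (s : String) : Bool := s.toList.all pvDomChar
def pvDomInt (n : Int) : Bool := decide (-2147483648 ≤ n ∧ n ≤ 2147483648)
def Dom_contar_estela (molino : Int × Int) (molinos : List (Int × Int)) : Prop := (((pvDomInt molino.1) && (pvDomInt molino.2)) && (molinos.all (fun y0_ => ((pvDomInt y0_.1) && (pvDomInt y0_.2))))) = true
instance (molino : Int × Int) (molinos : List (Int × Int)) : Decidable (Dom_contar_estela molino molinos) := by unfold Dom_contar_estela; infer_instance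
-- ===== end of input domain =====

-- B replaces A's per-windmill conditional scan with a frequency table queried at the
-- seven fixed candidate coordinates (idiomatic; same O(n) cost).

-- ===== PORT A =====
-- literal transliteration of A's loop: one accumulator, the same three branches in order
def contar_estela (molino : Int × Int) (molinos : List (Int × Int)) : Int :=
  molinos.foldl (fun estela otro =>
    let estela := if otro == molino then estela + 1 else estela
    if molino.1 = otro.1 ∧ 0 < molino.2 - otro.2 ∧ molino.2 - otro.2 ≤ 3 then estela + 1
    else if molino.2 = otro.2 ∧ 0 < otro.1 - molino.1 ∧ otro.1 - molino.1 ≤ 3 then estela + 1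
    else estela) 0

-- ===== PORT B =====
-- literal transliteration of Source B: build the dict counter, then sum lookups over the candidate list
def contar_estela_alt (molino : Int × Int) (molinos : List (Int × Int)) : Int :=
  let cnt := molinos.foldl (fun d m => d.insert m (d.getD m 0 + 1)) PySem.Dict.empty
  let candidatos := molino :: (([1, 2, 3] : List Int).map (fun d => (molino.1, molino.2 - d))
      ++ ([1, 2, 3] : List Int).map (fun d => (molino.1 + d, molino.2)))
  (candidatos.map (fun c => cnt.getD c 0)).sum

-- ===== PRECONDITION & SPEC =====
def Spec_contar_estela (molino : Int × Int) (molinos : List (Int × Int)) (out : Int) : Prop := out = contar_estela_alt molino molinos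
instance (molino : Int × Int) (molinos : List (Int × Int)) (out : Int) : Decidable (Spec_contar_estela molino molinos out) := by unfold Spec_contar_estela; infer_instance

-- ===== CLAIM (what is proved, stated in full; the proofs are below) =====
def Claim_equal_contar_estela : Prop := ∀ (molino : Int × Int) (molinos : List (Int × Int)), Dom_contar_estela molino molinos → Spec_contar_estela molino molinos (contar_estela molino molinos)

-- ===== LEMMAS AND PROOFS =====

-- A's fold, from any accumulator, adds the seven candidate counts
lemma contarA_foldl (molino : Int × Int) (molinos : List (Int × Int)) (acc : Int) :
    molinos.foldl (fun estela otro =>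
      let estela := if otro == molino then estela + 1 else estela
      if molino.1 = otro.1 ∧ 0 < molino.2 - otro.2 ∧ molino.2 - otro.2 ≤ 3 then estela + 1
      else if molino.2 = otro.2 ∧ 0 < otro.1 - molino.1 ∧ otro.1 - molino.1 ≤ 3 then estela + 1
      else estela) acc
    = acc + (molinos.count molino : Int)
        + (molinos.count (molino.1, molino.2 - 1) : Int)
        + (molinos.count (molino.1, molino.2 - 2) : Int)
        + (molinos.count (molino.1, molino.2 - 3) : Int)
        + (molinos.count (molino.1 + 1, molino.2) : Int)
        + (molinos.count (molino.1 + 2, molino.2) : Int)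
        + (molinos.count (molino.1 + 3, molino.2) : Int) := by
  induction molinos generalizing acc with
  | nil => simp
  | cons o xs ih =>
    rw [List.foldl_cons, ih]
    obtain ⟨x, y⟩ := molino
    obtain ⟨a, b⟩ := o
    simp only [List.count_cons, beq_iff_eq, Prod.mk.injEq]
    push_cast
    split_ifs <;> omega

theorem pv_equal (molino : Int × Int) (molinos : List (Int × Int)) :
    contar_estela molino molinos = contar_estela_alt molino molinos := by
  unfold contar_estela contar_estela_alt
  rw [PySem.Dict.foldl_insert_getD_add_one_eq_counter, contarA_foldl]
  simp [PySem.Dict.getD_counter]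
  ring

-- ===== VERDICT (by name: the statement is the Claim_ definition above) =====
theorem contar_estela_spec : Claim_equal_contar_estela := by
  intro molino molinos _
  exact pv_equal molino molinos
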